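-- pv_equiv track=rewrite | github.com/gklpern/auto-correction-implementation | Auto_correct.py | replace_letter
-- ===== SOURCE A (Python) =====
-- import string
--
-- def replace_letter(word):
--     """
--     Replaces each letter in the word with every other letter from the alphabet.
--
--     :param word: The word to be modified.
--     :return: List of words with each letter replaced by others.
--     """
--     letters = string.ascii_lowercase
--     replace_l = set()
--     for i in range(len(word)):
--         for letter in letters:
--             if word[i] != letter:
--                 replace_l.add(word[:i] + letter + word[i+1:])
--     return sorted(list(replace_l))
-- ===== SOURCE B (Python) =====
-- import string
--
-- def replace_letter(word):
--     """
--     Replaces each letter in the word with every other letter from the alphabet.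
--
--     :param word: The word to be modified.
--     :return: List of words with each letter replaced by others.
--     """
--     letters = string.ascii_lowercase
--     lows = []   # lows[i]: variants with word[i] replaced by a smaller letter
--     highs = []  # highs[i]: variants with word[i] replaced by a larger letter
--     for i in range(len(word)):
--         pre, ch, suf = word[:i], word[i], word[i + 1:]
--         lows.append([pre + c + suf for c in letters if c < ch])
--         highs.append([pre + c + suf for c in letters if c > ch])
--     out = []
--     for block in lows:
--         out += block
--     for block in reversed(highs):
--         out += block
--     return out
-- ===== Notes on version B (the rewrite author's own statement) =====
-- stated objective: faster
-- what changed: Replaces the build-a-set-of-all-variants-then-sort approach by two per-position passes that emit the variants directly in sorted order (all smaller-letter variants for i = 0..n-1, then all larger-letter variants for i = n-1..0), removing both the set and the sort.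
import Mathlib
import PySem

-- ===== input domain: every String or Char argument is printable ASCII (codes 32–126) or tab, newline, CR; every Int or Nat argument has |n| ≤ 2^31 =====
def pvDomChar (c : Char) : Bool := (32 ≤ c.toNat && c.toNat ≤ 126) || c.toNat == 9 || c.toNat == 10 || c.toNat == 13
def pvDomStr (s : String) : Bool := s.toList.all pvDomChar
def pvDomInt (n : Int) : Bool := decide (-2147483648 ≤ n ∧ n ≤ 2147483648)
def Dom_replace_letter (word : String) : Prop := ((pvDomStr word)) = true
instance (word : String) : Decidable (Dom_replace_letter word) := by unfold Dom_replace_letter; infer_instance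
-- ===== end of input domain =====

-- B replaces A's "collect every single-letter variant in a set, then sort" by two per-position
-- passes that emit the variants directly in sorted order (no set, no sort): objective = faster.

-- ===== PORT A =====
def pvLetters : List Char := "abcdefghijklmnopqrstuvwxyz".toList

def replace_letter (word : String) : List String :=
  let cs := word.toList
  let replace_l : PySem.Set String :=
    (List.range cs.length).foldl (fun acc i =>
      pvLetters.foldl (fun acc letter =>
        if cs[i]! ≠ letter then
          PySem.Set.add acc (String.ofList (cs.take i ++ letter :: cs.drop (i + 1)))
        else acc) acc) PySem.Set.empty
  PySem.List.sorted replace_l (fun x => x)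

-- ===== PORT B =====
def replace_letter_alt (word : String) : List String :=
  let cs := word.toList
  let blocks : List (List String) × List (List String) :=
    (List.range cs.length).foldl (fun lh i =>
      let pre := cs.take i
      let ch := cs[i]!
      let suf := cs.drop (i + 1)
      (lh.1 ++ [(pvLetters.filter (fun c => c < ch)).map (fun c => String.ofList (pre ++ c :: suf))],
       lh.2 ++ [(pvLetters.filter (fun c => ch < c)).map (fun c => String.ofList (pre ++ c :: suf))]))
      ([], [])
  blocks.2.reverse.foldl (fun out block => out ++ block)
    (blocks.1.foldl (fun out block => out ++ block) [])

-- ===== PRECONDITION & SPEC =====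
def Spec_replace_letter (word : String) (out : List String) : Prop := out = replace_letter_alt word
instance (word : String) (out : List String) : Decidable (Spec_replace_letter word out) := by unfold Spec_replace_letter; infer_instance

-- ===== CLAIM (what is proved, stated in full; the proofs are below) =====
def Claim_equal_replace_letter : Prop := ∀ (word : String), Dom_replace_letter word → Spec_replace_letter word (replace_letter word)

-- ===== LEMMAS AND PROOFS =====

def pvAltChars : List Char → List (List Char)
  | [] => []
  | h :: t =>
      (pvLetters.filter (fun c => c < h)).map (fun c => c :: t)
      ++ (pvAltChars t).map (fun w => h :: w)
      ++ (pvLetters.filter (fun c => h < c)).map (fun c => c :: t)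

-- per-position blocks of B, on the character-list level (proof bridge)
def pvLoC (cs : List Char) (i : Nat) : List (List Char) :=
  (pvLetters.filter (fun c => c < cs[i]!)).map (fun c => cs.take i ++ c :: cs.drop (i + 1))

def pvHiC (cs : List Char) (i : Nat) : List (List Char) :=
  (pvLetters.filter (fun c => cs[i]! < c)).map (fun c => cs.take i ++ c :: cs.drop (i + 1))

-- the flat list of candidates A's nested loops feed into the set, in generation order
def pvGen (cs : List Char) : List String :=
  (List.range cs.length).flatMap (fun i =>
    (pvLetters.filter (fun letter => cs[i]! ≠ letter)).map
      (fun letter => String.ofList (cs.take i ++ letter :: cs.drop (i + 1))))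

lemma pv_foldl_add_flatMap (g : Nat → List String) (l : List Nat) (acc : PySem.Set String) :
    l.foldl (fun acc i => (g i).foldl PySem.Set.add acc) acc
      = (l.flatMap g).foldl PySem.Set.add acc := by
  induction l generalizing acc with
  | nil => rfl
  | cons x t ih => simp [List.flatMap_cons, List.foldl_append, ih]

lemma pv_replace_letter_eq_sorted_ofList (word : String) :
    replace_letter word = PySem.List.sorted (PySem.Set.ofList (pvGen word.toList)) (fun x => x) := by
  simp only [replace_letter, pvGen]
  congr 1
  refine (PySem.List.foldl_congr_mem _ _ (fun acc i =>
        ((pvLetters.filter (fun letter => word.toList[i]! ≠ letter)).map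
          (fun letter => String.ofList (word.toList.take i ++ letter :: word.toList.drop (i + 1)))).foldl
          PySem.Set.add acc) _ ?_).trans ?_
  · intro acc i _
    rw [PySem.List.foldl_ite_eq_foldl_filter]
    beta_reduce
    rw [List.foldl_map]
  · rw [pv_foldl_add_flatMap]
    rfl

lemma pv_mem_pvAltChars (cs x : List Char) :
    x ∈ pvAltChars cs ↔ ∃ i, ∃ h : i < cs.length, ∃ c ∈ pvLetters,
      c ≠ cs[i] ∧ x = cs.take i ++ c :: cs.drop (i + 1) := by
  induction cs generalizing x with
  | nil => simp [pvAltChars]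
  | cons hd t ih =>
    simp only [pvAltChars, List.mem_append, List.mem_map, List.mem_filter, ih]
    constructor
    · rintro ((⟨c, ⟨hc, hlt⟩, rfl⟩ | ⟨w, ⟨j, hj, c, hc, hne, rfl⟩, rfl⟩) | ⟨c, ⟨hc, hlt⟩, rfl⟩)
      · exact ⟨0, by simp, c, hc, by simpa using ne_of_lt (by simpa using hlt), by simp⟩
      · exact ⟨j + 1, by simpa using hj, c, hc, by simpa using hne, by simp⟩
      · exact ⟨0, by simp, c, hc, by simpa using (ne_of_gt (by simpa using hlt)), by simp⟩
    · rintro ⟨i, hi, c, hc, hne, rfl⟩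
      cases i with
      | zero =>
        rcases lt_or_gt_of_ne (by simpa using hne) with h | h
        · exact Or.inl (Or.inl ⟨c, ⟨hc, by simpa using h⟩, by simp⟩)
        · exact Or.inr ⟨c, ⟨hc, by simpa using h⟩, by simp⟩
      | succ j =>
        exact Or.inl (Or.inr ⟨t.take j ++ c :: t.drop (j + 1),
          ⟨j, by simpa using hi, c, hc, by simpa using hne, rfl⟩, by simp⟩)

lemma pv_mem_pvGen (cs : List Char) (x : String) :
    x ∈ pvGen cs ↔ ∃ i, ∃ h : i < cs.length, ∃ c ∈ pvLetters,
      c ≠ cs[i] ∧ x = String.ofList (cs.take i ++ c :: cs.drop (i + 1)) := by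
  unfold pvGen
  simp only [List.mem_flatMap, List.mem_range, List.mem_map, List.mem_filter]
  constructor
  · rintro ⟨i, hi, c, ⟨hc, hne⟩, rfl⟩
    have hne' : cs[i] ≠ c := by
      have := of_decide_eq_true hne
      rwa [getElem!_pos cs i hi] at this
    exact ⟨i, hi, c, hc, hne'.symm, rfl⟩
  · rintro ⟨i, hi, c, hc, hne, rfl⟩
    refine ⟨i, hi, c, ⟨hc, decide_eq_true ?_⟩, rfl⟩
    rw [getElem!_pos cs i hi]
    exact hne.symm

lemma pv_pairwise_pvAltChars (cs : List Char) :
    (pvAltChars cs).Pairwise (· < ·) := by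
  induction cs with
  | nil => simp [pvAltChars]
  | cons hd t ih =>
    have hlet : pvLetters.Pairwise (· < ·) := by decide
    rw [pvAltChars, List.pairwise_append, List.pairwise_append]
    refine ⟨⟨?_, ?_, ?_⟩, ?_, ?_⟩
    · rw [List.pairwise_map]
      exact (hlet.filter _).imp (fun hab => List.cons_lt_cons_iff.mpr (Or.inl hab))
    · rw [List.pairwise_map]
      exact ih.imp (fun hab => List.cons_lt_cons_iff.mpr (Or.inr ⟨rfl, hab⟩))
    · rintro x hx y hy
      rcases List.mem_map.mp hx with ⟨c, hc, rfl⟩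
      rcases List.mem_map.mp hy with ⟨w, _, rfl⟩
      exact List.cons_lt_cons_iff.mpr (Or.inl (of_decide_eq_true (List.mem_filter.mp hc).2))
    · rw [List.pairwise_map]
      exact (hlet.filter _).imp (fun hab => List.cons_lt_cons_iff.mpr (Or.inl hab))
    · rintro x hx y hy
      rcases List.mem_map.mp hy with ⟨c', hc', rfl⟩
      have hgt : hd < c' := of_decide_eq_true (List.mem_filter.mp hc').2
      rcases List.mem_append.mp hx with hx | hx
      · rcases List.mem_map.mp hx with ⟨c, hc, rfl⟩
        exact List.cons_lt_cons_iff.mpr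
          (Or.inl (lt_trans (of_decide_eq_true (List.mem_filter.mp hc).2) hgt))
      · rcases List.mem_map.mp hx with ⟨w, _, rfl⟩
        exact List.cons_lt_cons_iff.mpr (Or.inl hgt)

lemma pvLoC_cons_zero (hd : Char) (t : List Char) :
    pvLoC (hd :: t) 0 = (pvLetters.filter (fun c => c < hd)).map (fun c => c :: t) := by
  simp [pvLoC]

lemma pvHiC_cons_zero (hd : Char) (t : List Char) :
    pvHiC (hd :: t) 0 = (pvLetters.filter (fun c => hd < c)).map (fun c => c :: t) := by
  simp [pvHiC]

lemma pvLoC_cons_succ (hd : Char) (t : List Char) (i : Nat) :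
    pvLoC (hd :: t) (i + 1) = (pvLoC t i).map (fun w => hd :: w) := by
  simp [pvLoC, List.map_map]

lemma pvHiC_cons_succ (hd : Char) (t : List Char) (i : Nat) :
    pvHiC (hd :: t) (i + 1) = (pvHiC t i).map (fun w => hd :: w) := by
  simp [pvHiC, List.map_map]

lemma pv_altChars_split (cs : List Char) :
    pvAltChars cs = ((List.range cs.length).map (pvLoC cs)).flatten
      ++ (((List.range cs.length).map (pvHiC cs)).reverse).flatten := by
  induction cs with
  | nil => simp [pvAltChars]
  | cons hd t ih =>
    rw [pvAltChars, ih,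
      show (hd :: t).length = t.length + 1 from rfl, List.range_succ_eq_map]
    simp [pvLoC_cons_zero, pvLoC_cons_succ, pvHiC_cons_zero, pvHiC_cons_succ,
      List.map_map, Function.comp_def, List.flatten_append, List.map_append,
      List.map_flatten, List.map_reverse, List.append_assoc]

lemma pv_alt_eq_map (word : String) :
    replace_letter_alt word = (pvAltChars word.toList).map String.ofList := by
  simp only [replace_letter_alt]
  rw [PySem.List.foldl_prod_mk
      (f := fun l i => l ++ [(pvLetters.filter (fun c => c < word.toList[i]!)).map
        (fun c => String.ofList (word.toList.take i ++ c :: word.toList.drop (i + 1)))])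
      (g := fun l i => l ++ [(pvLetters.filter (fun c => word.toList[i]! < c)).map
        (fun c => String.ofList (word.toList.take i ++ c :: word.toList.drop (i + 1)))])]
  rw [PySem.List.foldl_append_singleton_eq_map, PySem.List.foldl_append_singleton_eq_map,
    PySem.List.foldl_append_eq_flatten, PySem.List.foldl_append_eq_flatten]
  rw [pv_altChars_split]
  simp [pvLoC, pvHiC, List.map_map, Function.comp_def, List.map_flatten, List.map_reverse]

lemma pv_pairwise_alt (word : String) :
    (replace_letter_alt word).Pairwise (· < ·) := by
  rw [pv_alt_eq_map, List.pairwise_map]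
  exact (pv_pairwise_pvAltChars word.toList).imp (fun h => by
    rw [String.lt_iff_toList_lt]; simpa)

lemma pv_perm (word : String) :
    (replace_letter_alt word).Perm (PySem.Set.ofList (pvGen word.toList)) := by
  rw [List.perm_ext_iff_of_nodup
    ((pv_pairwise_alt word).imp ne_of_lt)
    (PySem.Set.nodup_ofList _)]
  intro a
  rw [PySem.Set.mem_ofList, pv_mem_pvGen, pv_alt_eq_map]
  simp only [List.mem_map]
  constructor
  · rintro ⟨w, hw, rfl⟩
    rcases (pv_mem_pvAltChars _ _).mp hw with ⟨i, hi, c, hc, hne, rfl⟩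
    exact ⟨i, hi, c, hc, hne, rfl⟩
  · rintro ⟨i, hi, c, hc, hne, rfl⟩
    exact ⟨_, (pv_mem_pvAltChars _ _).mpr ⟨i, hi, c, hc, hne, rfl⟩, rfl⟩

-- ===== VERDICT (by name: the statement is the Claim_ definition above) =====
theorem replace_letter_spec : Claim_equal_replace_letter := by
  intro word _
  unfold Spec_replace_letter
  rw [pv_replace_letter_eq_sorted_ofList]
  exact PySem.List.sorted_eq_of_perm_of_pairwise_lt _ _ _ (pv_perm word) (pv_pairwise_alt word)
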